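-- pv_equiv track=rewrite | github.com/shiveshsky/datastructures | contest_V.py | solve
-- ===== SOURCE A (Python) =====
-- from collections import Counter
--
-- def solve(A, B):
--     counterA = Counter(A)
--     counterB = Counter(B)
--     if counterA == counterB:
--         return 1
--     diff = counterA - counterB
--     isdiv1 = True
--     for k,v in diff.items():
--         if v%2 != 0:
--             isdiv1 = False
--     diff2 = counterB - counterA
--     isdiv2 = True
--     for k,v in diff2.items():
--         if v%2 != 0:
--             isdiv2 = False
--     if isdiv1 and isdiv2:
--         return 1
--     return 0
-- ===== SOURCE B (Python) =====
-- from collections import Counter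
--
-- def solve(A, B):
--     oddA = {k for k, v in Counter(A).items() if v % 2 == 1}
--     oddB = {k for k, v in Counter(B).items() if v % 2 == 1}
--     return 1 if oddA == oddB else 0
-- ===== Notes on version B (the rewrite author's own statement) =====
-- stated objective: simpler
-- what changed: Replaces the counter-equality test plus two Counter-subtraction passes with two evenness loops by a single equality test on the sets of odd-count elements of each list.
import Mathlib
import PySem

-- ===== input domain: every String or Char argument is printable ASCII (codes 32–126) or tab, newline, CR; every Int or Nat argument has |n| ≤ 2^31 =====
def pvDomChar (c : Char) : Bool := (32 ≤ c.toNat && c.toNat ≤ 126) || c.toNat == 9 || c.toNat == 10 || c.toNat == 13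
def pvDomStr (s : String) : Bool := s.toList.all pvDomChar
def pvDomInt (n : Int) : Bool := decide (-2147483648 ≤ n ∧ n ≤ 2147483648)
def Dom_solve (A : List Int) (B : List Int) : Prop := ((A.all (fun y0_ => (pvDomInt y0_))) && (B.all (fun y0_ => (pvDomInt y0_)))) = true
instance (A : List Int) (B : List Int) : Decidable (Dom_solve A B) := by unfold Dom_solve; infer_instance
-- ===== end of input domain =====

-- B replaces A's counter-equality test and two Counter-subtraction + evenness passes
-- with one equality test on the sets of odd-count elements (objective: simpler).


-- ===== PORT A =====
-- Counter(A) is PySem.Dict.counter; Counter == is dict ==, i.e. same key set and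
-- agreeing values (order ignored); Counter subtraction keeps positive differences,
-- over self's keys (the other's keys can only yield non-positive differences here).
def solve (A : List Int) (B : List Int) : Int :=
  let counterA := PySem.Dict.counter A
  let counterB := PySem.Dict.counter B
  if PySem.Set.equal counterA.keys counterB.keys &&
     counterA.keys.all (fun k => counterA.getD k 0 == counterB.getD k 0) then 1
  else
    let diff := counterA.items.filterMap (fun p =>
      let d := p.2 - counterB.getD p.1 0
      if 0 < d then some (p.1, d) else none)
    let isdiv1 := diff.foldl (fun b p => if PySem.Int.mod p.2 2 ≠ 0 then false else b) true
    let diff2 := counterB.items.filterMap (fun p =>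
      let d := p.2 - counterA.getD p.1 0
      if 0 < d then some (p.1, d) else none)
    let isdiv2 := diff2.foldl (fun b p => if PySem.Int.mod p.2 2 ≠ 0 then false else b) true
    if isdiv1 && isdiv2 then 1 else 0

-- ===== PORT B =====
def solve_alt (A : List Int) (B : List Int) : Int :=
  let oddA := PySem.Set.ofList
    (((PySem.Dict.counter A).items.filter (fun p => PySem.Int.mod p.2 2 == 1)).map Prod.fst)
  let oddB := PySem.Set.ofList
    (((PySem.Dict.counter B).items.filter (fun p => PySem.Int.mod p.2 2 == 1)).map Prod.fst)
  if PySem.Set.equal oddA oddB then 1 else 0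

-- ===== PRECONDITION & SPEC =====
def Spec_solve (A : List Int) (B : List Int) (out : Int) : Prop := out = solve_alt A B
instance (A : List Int) (B : List Int) (out : Int) : Decidable (Spec_solve A B out) := by unfold Spec_solve; infer_instance

-- ===== CLAIM (what is proved, stated in full; the proofs are below) =====
def Claim_equal_solve : Prop := ∀ (A : List Int) (B : List Int), Dom_solve A B → Spec_solve A B (solve A B)

-- ===== LEMMAS AND PROOFS =====

theorem foldl_latch (l : List (Int × Int)) (c : Int × Int → Prop) [DecidablePred c] (b : Bool) :
    l.foldl (fun b p => if c p then false else b) b = (b && l.all (fun p => !decide (c p))) := by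
  induction l generalizing b with
  | nil => simp
  | cons x xs ih =>
    by_cases h : c x
    · simp only [List.foldl_cons, if_pos h, ih]; simp [h]
    · simp only [List.foldl_cons, if_neg h, ih]; simp [h]

theorem div_iff (X Y : List Int) :
    ((((PySem.Dict.counter X).items.filterMap (fun p =>
        if 0 < p.2 - (PySem.Dict.counter Y).getD p.1 0 then
          some (p.1, p.2 - (PySem.Dict.counter Y).getD p.1 0) else none)).foldl
          (fun b p => if PySem.Int.mod p.2 2 ≠ 0 then false else b) true) = true)
    ↔ ∀ k ∈ X, Y.count k < X.count k → X.count k % 2 = Y.count k % 2 := by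
  rw [foldl_latch]
  simp only [Bool.true_and, List.all_eq_true, List.mem_filterMap,
    PySem.Dict.items_counter, PySem.Dict.getD_counter]
  constructor
  · intro H k hk hlt
    have hm : (k, (X.count k : Int)) ∈ (PySem.Set.ofList X).map (fun k => (k, (X.count k : Int))) :=
      List.mem_map.mpr ⟨k, (PySem.Set.mem_ofList _ _).mpr hk, rfl⟩
    have := H (k, (X.count k : Int) - Y.count k)
      ⟨(k, (X.count k : Int)), hm, by rw [if_pos (show (0:Int) < ((X.count k : Nat) : Int) - ((Y.count k : Nat) : Int) by omega)]⟩
    simp at this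
    omega
  · rintro H p ⟨q, hq, hf⟩
    obtain ⟨k, hk, rfl⟩ := List.mem_map.mp hq
    simp only at hf
    by_cases hlt : (0:Int) < X.count k - Y.count k
    · rw [if_pos hlt] at hf
      have hpar := H k ((PySem.Set.mem_ofList _ _).mp hk) (by omega)
      cases hf
      simp
      omega
    · rw [if_neg hlt] at hf; cases hf

theorem ceq_iff (A B : List Int) :
    ((PySem.Set.equal (PySem.Dict.counter A).keys (PySem.Dict.counter B).keys &&
     (PySem.Dict.counter A).keys.all
       (fun k => (PySem.Dict.counter A).getD k 0 == (PySem.Dict.counter B).getD k 0)) = true)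
    ↔ ∀ k : Int, A.count k = B.count k := by
  simp only [Bool.and_eq_true, PySem.Set.equal_iff, PySem.Dict.keys_counter,
    PySem.Dict.getD_counter, List.all_eq_true, PySem.Set.mem_ofList, beq_iff_eq]
  constructor
  · rintro ⟨hmem, hval⟩ k
    by_cases hk : k ∈ A
    · exact_mod_cast hval k hk
    · have h2 : k ∉ B := fun h => hk ((hmem k).mpr h)
      rw [List.count_eq_zero_of_not_mem hk, List.count_eq_zero_of_not_mem h2]
  · intro h
    refine ⟨fun x => ?_, fun k _ => by rw [h k]⟩
    constructor <;> intro hx <;> [skip; skip] <;>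
      [ (have := List.count_pos_iff.mpr hx; rw [h x] at this; exact List.count_pos_iff.mp this);
        (have := List.count_pos_iff.mpr hx; rw [← h x] at this; exact List.count_pos_iff.mp this) ]

theorem both_iff (A B : List Int) :
    ((∀ k ∈ A, B.count k < A.count k → A.count k % 2 = B.count k % 2) ∧
     (∀ k ∈ B, A.count k < B.count k → B.count k % 2 = A.count k % 2))
    ↔ ∀ k : Int, A.count k % 2 = B.count k % 2 := by
  constructor
  · rintro ⟨E1, E2⟩ k
    by_cases h1 : k ∈ A <;> by_cases h2 : k ∈ B
    · rcases Nat.lt_trichotomy (A.count k) (B.count k) with h | h | h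
      · have := E2 k h2 h; omega
      · omega
      · exact E1 k h1 h
    · have hb := List.count_eq_zero_of_not_mem h2
      have ha := List.count_pos_iff.mpr h1
      exact E1 k h1 (by omega)
    · have ha := List.count_eq_zero_of_not_mem h1
      have hb := List.count_pos_iff.mpr h2
      have := E2 k h2 (by omega); omega
    · rw [List.count_eq_zero_of_not_mem h1, List.count_eq_zero_of_not_mem h2]
  · intro h
    exact ⟨fun k _ _ => h k, fun k _ _ => (h k).symm⟩

theorem solve_one_iff (A B : List Int) :
    solve A B = 1 ↔ ∀ k : Int, A.count k % 2 = B.count k % 2 := by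
  simp only [solve]
  by_cases hC : ∀ k : Int, A.count k = B.count k
  · rw [if_pos ((ceq_iff A B).mpr hC)]
    exact iff_of_true rfl (fun k => by rw [hC k])
  · rw [if_neg (fun hc => hC ((ceq_iff A B).mp hc))]
    simp only [Bool.and_eq_true, div_iff]
    rw [← both_iff]
    split_ifs with h
    · exact iff_of_true rfl h
    · exact iff_of_false (by norm_num) h

theorem mem_odd (L : List Int) (x : Int) :
    (x ∈ (((PySem.Dict.counter L).items.filter (fun p => PySem.Int.mod p.2 2 == 1)).map Prod.fst)) ↔
      x ∈ L ∧ L.count x % 2 = 1 := by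
  simp [PySem.Dict.items_counter, List.mem_map, List.mem_filter, PySem.Set.mem_ofList]
  intro _
  omega

theorem alt_one_iff (A B : List Int) :
    solve_alt A B = 1 ↔ ∀ k : Int, A.count k % 2 = B.count k % 2 := by
  simp only [solve_alt]
  constructor
  · intro h k
    split_ifs at h with hb
    · rw [PySem.Set.equal_iff] at hb
      have := hb k
      simp only [PySem.Set.mem_ofList, mem_odd] at this
      by_cases h1 : k ∈ A <;> by_cases h2 : k ∈ B
      · have f1 : A.count k % 2 = 1 → B.count k % 2 = 1 := fun e => (this.mp ⟨h1, e⟩).2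
        have f2 : B.count k % 2 = 1 → A.count k % 2 = 1 := fun e => (this.mpr ⟨h2, e⟩).2
        omega
      · have hb0 := List.count_eq_zero_of_not_mem h2
        have f1 : A.count k % 2 ≠ 1 := fun e => h2 (this.mp ⟨h1, e⟩).1
        omega
      · have ha0 := List.count_eq_zero_of_not_mem h1
        have f2 : B.count k % 2 ≠ 1 := fun e => h1 (this.mpr ⟨h2, e⟩).1
        omega
      · rw [List.count_eq_zero_of_not_mem h1, List.count_eq_zero_of_not_mem h2]
    · exact absurd h (by norm_num)
  · intro h
    rw [if_pos]
    rw [PySem.Set.equal_iff]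
    intro x
    simp only [PySem.Set.mem_ofList, mem_odd]
    constructor
    · rintro ⟨hx, hp⟩
      have := h x
      have hbpos : 0 < B.count x := by
        have := List.count_pos_iff.mpr hx; omega
      exact ⟨List.count_pos_iff.mp hbpos, by omega⟩
    · rintro ⟨hx, hp⟩
      have := h x
      have hapos : 0 < A.count x := by
        have := List.count_pos_iff.mpr hx; omega
      exact ⟨List.count_pos_iff.mp hapos, by omega⟩

-- ===== VERDICT (by name: the statement is the Claim_ definition above) =====
theorem solve_spec : Claim_equal_solve := by
  intro A B _
  unfold Spec_solve
  by_cases h : ∀ k : Int, A.count k % 2 = B.count k % 2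
  · rw [(solve_one_iff A B).mpr h, (alt_one_iff A B).mpr h]
  · have h1 : solve A B ≠ 1 := fun e => h ((solve_one_iff A B).mp e)
    have h2 : solve_alt A B ≠ 1 := fun e => h ((alt_one_iff A B).mp e)
    have v1 : solve A B = 1 ∨ solve A B = 0 := by
      simp only [solve]; split_ifs <;> simp
    have v2 : solve_alt A B = 1 ∨ solve_alt A B = 0 := by
      simp only [solve_alt]; split_ifs <;> simp
    rcases v1 with e | e <;> rcases v2 with e' | e' <;> simp_all
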